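-- pv_equiv track=rewrite | github.com/Gradata/gradata | Gradata/src/gradata/enhancements/rule_export.py | _format_grouped_markdown
-- ===== SOURCE A (Python) =====
-- def _format_grouped_markdown(title: str, rules: list[tuple[str, str]]) -> str:
--     """Render rules as a markdown doc with a title, intro, and ``## CATEGORY``
--     sections of bullet points. Shared body for AGENTS.md / Codex / Cline /
--     Continue.dev exports — they all consume the same schema (markdown
--     appended to a system prompt), only the H1 title and output path differ.
--     """
--     if not rules:
--         return f"# {title}\n\nNo graduated rules yet.\n"
--     by_cat: dict[str, list[str]] = {}
--     for cat, desc in rules: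
--         by_cat.setdefault(cat, []).append(desc)
--     lines = [
--         f"# {title}",
--         "",
--         "Graduated rules learned from corrections. Follow these in every response.",
--         "",
--     ]
--     for cat in sorted(by_cat):
--         lines.append(f"## {cat}")
--         lines.append("")
--         for desc in by_cat[cat]:
--             lines.append(f"- {desc}")
--         lines.append("")
--     return "\n".join(lines) + "\n"
-- ===== SOURCE B (Python) =====
-- def _format_grouped_markdown(title: str, rules: list[tuple[str, str]]) -> str:
--     """Same markdown rendering, without building a grouping dict: iterate the
--     sorted distinct categories and select each category's rules by filtering
--     the original list (which preserves input order within a category)."""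
--     if not rules:
--         return f"# {title}\n\nNo graduated rules yet.\n"
--     cats = sorted({cat for cat, _ in rules})
--     parts = [
--         f"# {title}",
--         "",
--         "Graduated rules learned from corrections. Follow these in every response.",
--         "",
--     ]
--     for cat in cats:
--         parts += [f"## {cat}", ""]
--         parts += [f"- {desc}" for c, desc in rules if c == cat]
--         parts.append("")
--     return "\n".join(parts) + "\n"
-- ===== Notes on version B (the rewrite author's own statement) =====
-- stated objective: alternative
-- what changed: Replaces the setdefault-dict grouping with a dict-free pass: sort the distinct categories and select each section's bullets by filtering the original list per category.
import Mathlib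
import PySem

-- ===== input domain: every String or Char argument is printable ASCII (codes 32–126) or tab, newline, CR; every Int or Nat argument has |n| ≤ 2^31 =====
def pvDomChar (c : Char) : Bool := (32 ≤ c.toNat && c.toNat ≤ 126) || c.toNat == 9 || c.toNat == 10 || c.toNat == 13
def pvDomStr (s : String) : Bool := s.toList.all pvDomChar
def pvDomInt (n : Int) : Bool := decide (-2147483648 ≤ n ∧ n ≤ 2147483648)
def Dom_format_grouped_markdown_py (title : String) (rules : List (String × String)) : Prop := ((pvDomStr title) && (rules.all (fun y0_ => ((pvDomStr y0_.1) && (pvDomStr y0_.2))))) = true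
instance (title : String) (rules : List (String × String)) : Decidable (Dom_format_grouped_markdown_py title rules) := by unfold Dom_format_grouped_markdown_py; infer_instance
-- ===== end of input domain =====

-- B replaces A's setdefault-dict grouping by sorting the distinct categories and
-- filtering the rule list per category (alternative decomposition, same cost class).

-- ===== PORT A =====
-- by_cat.setdefault(cat, []).append(desc) = by_cat[cat] = by_cat.get(cat, []) + [desc] = Dict.modify
-- by_cat[cat] in the emit loop: cat is always a key, so getD is exact there.
def format_grouped_markdown_py (title : String) (rules : List (String × String)) : String :=
  if rules = [] then "# " ++ title ++ "\n\nNo graduated rules yet.\n"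
  else
    let by_cat : PySem.Dict String (List String) :=
      rules.foldl (fun d p => d.modify p.1 [] (· ++ [p.2])) PySem.Dict.empty
    let lines : List String :=
      ["# " ++ title, "",
       "Graduated rules learned from corrections. Follow these in every response.", ""]
    let lines :=
      (PySem.List.sorted by_cat.keys (fun x => x) false).foldl
        (fun ls cat =>
          ((by_cat.getD cat []).foldl (fun ls' desc => ls' ++ ["- " ++ desc])
              (ls ++ ["## " ++ cat, ""])) ++ [""])
        lines
    PySem.Str.join "\n" lines ++ "\n"

-- ===== PORT B =====
def format_grouped_markdown_py_alt (title : String) (rules : List (String × String)) : String :=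
  if rules = [] then "# " ++ title ++ "\n\nNo graduated rules yet.\n"
  else
    let cats : List String :=
      PySem.List.sorted (PySem.Set.ofList (rules.map (·.1))) (fun x => x) false
    let parts : List String :=
      ["# " ++ title, "",
       "Graduated rules learned from corrections. Follow these in every response.", ""]
    let parts :=
      cats.foldl
        (fun ps cat =>
          (ps ++ ["## " ++ cat, ""]
             ++ (rules.filter (fun p => p.1 == cat)).map (fun p => "- " ++ p.2))
          ++ [""])
        parts
    PySem.Str.join "\n" parts ++ "\n"

-- ===== PRECONDITION & SPEC =====
def Spec_format_grouped_markdown_py (title : String) (rules : List (String × String)) (out : String) : Prop := out = format_grouped_markdown_py_alt title rules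
instance (title : String) (rules : List (String × String)) (out : String) : Decidable (Spec_format_grouped_markdown_py title rules out) := by unfold Spec_format_grouped_markdown_py; infer_instance

-- ===== CLAIM (what is proved, stated in full; the proofs are below) =====
def Claim_equal_format_grouped_markdown_py : Prop := ∀ (title : String) (rules : List (String × String)), Dom_format_grouped_markdown_py title rules → Spec_format_grouped_markdown_py title rules (format_grouped_markdown_py title rules)

-- ===== LEMMAS AND PROOFS =====

-- the dict built by A's grouping loop, keyed lookup = filter of the original list
theorem pv_getD_group (rules : List (String × String)) (c : String) :
    ((rules.foldl (fun d p => d.modify p.1 [] (· ++ [p.2]))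
        (PySem.Dict.empty : PySem.Dict String (List String))).getD c []) =
      (rules.filter (fun p => p.1 == c)).map (·.2) := by
  simpa using PySem.Dict.getD_foldl_modify_append rules PySem.Dict.empty c

theorem pv_keys_group (rules : List (String × String)) :
    ((rules.foldl (fun d p => d.modify p.1 [] (· ++ [p.2]))
        (PySem.Dict.empty : PySem.Dict String (List String))).keys) =
      PySem.Set.ofList (rules.map (·.1)) := by
  simpa [PySem.Set.update_nil_left] using
    PySem.Dict.keys_foldl_modify_key rules (·.1) [] (fun d p => (· ++ [p.2])) PySem.Dict.empty

-- ===== VERDICT (by name: the statement is the Claim_ definition above) =====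
theorem format_grouped_markdown_py_spec : Claim_equal_format_grouped_markdown_py := by
  intro title rules _
  unfold Spec_format_grouped_markdown_py format_grouped_markdown_py format_grouped_markdown_py_alt
  by_cases h : rules = []
  · simp [h]
  · simp only [h, pv_keys_group]
    refine congrArg (fun l => PySem.Str.join "\n" l ++ "\n") ?_
    apply PySem.List.foldl_congr_mem
    intro ls cat _
    rw [pv_getD_group, PySem.List.foldl_append_singleton_eq_map, List.map_map]
    simp [Function.comp, List.append_assoc]
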